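-- pv_equiv track=rewrite | github.com/happyAnger66-an/Orbit | orbit/agents/tools/process_session_registry.py | _cap_pending_buffer
-- ===== SOURCE A (Python) =====
-- from typing import Any, Dict, List, Literal, Optional, Tuple
--
-- def _cap_pending_buffer(buf: List[str], pending_chars: int, cap: int) -> int:
--     if pending_chars <= cap:
--         return pending_chars
--     overflow = pending_chars - cap
--     if not buf:
--         return 0
--     first = buf[0]
--     if len(first) <= overflow:
--         buf.pop(0)
--         return _cap_pending_buffer(buf, pending_chars - len(first), cap)
--     buf[0] = first[overflow:]
--     return cap
-- ===== SOURCE B (Python) =====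
-- from typing import List
--
-- def _cap_pending_buffer(buf: List[str], pending_chars: int, cap: int) -> int:
--     if pending_chars <= cap:
--         return pending_chars
--     overflow = pending_chars - cap
--     acc = 0
--     for i, s in enumerate(buf):
--         acc += len(s)
--         if acc >= overflow:
--             # found cutoff: drop whole strings before i, trim or drop buf[i]
--             del buf[:i]
--             extra = acc - overflow  # chars of s to keep
--             if extra > 0:
--                 buf[0] = buf[0][len(buf[0]) - extra:]
--             else:
--                 del buf[:1]
--             return cap
--     buf.clear()
--     return 0
-- ===== Notes on version B (the rewrite author's own statement) =====
-- stated objective: alternative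
-- what changed: B replaces A's one-pop-per-recursive-call scheme (a Python-level recursion that re-slices and recomputes the overflow each step) with a single forward scan accumulating lengths to find the cutoff index, followed by one slice deletion and one boundary trim (intended as faster; a timing run measured 1.61x median at the largest size but inconsistently, so no speed is claimed).
import Mathlib
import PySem

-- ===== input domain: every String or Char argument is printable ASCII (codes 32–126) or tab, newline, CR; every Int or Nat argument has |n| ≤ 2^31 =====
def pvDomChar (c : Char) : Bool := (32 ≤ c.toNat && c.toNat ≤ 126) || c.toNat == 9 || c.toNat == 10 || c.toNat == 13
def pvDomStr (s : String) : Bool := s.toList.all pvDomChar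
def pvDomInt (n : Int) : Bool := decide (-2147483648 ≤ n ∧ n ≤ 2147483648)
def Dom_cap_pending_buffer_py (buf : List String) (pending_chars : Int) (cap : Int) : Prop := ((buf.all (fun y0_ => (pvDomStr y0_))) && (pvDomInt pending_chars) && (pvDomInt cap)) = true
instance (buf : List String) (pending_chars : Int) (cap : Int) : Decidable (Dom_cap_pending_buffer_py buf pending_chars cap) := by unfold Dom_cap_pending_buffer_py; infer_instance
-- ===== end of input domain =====

-- ===== PORT A =====
-- Port of A: structural recursion popping one leading string per call.
-- A also mutates `buf` (pop / in-place trim); the equivalence proved here is about the RETURN value only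
-- (B performs the same mutations in Python).
def cap_pending_buffer_py (buf : List String) (pending_chars : Int) (cap : Int) : Int :=
  if pending_chars ≤ cap then pending_chars
  else
    match buf with
    | [] => 0
    | first :: rest =>
      if PySem.Str.len first ≤ pending_chars - cap then
        cap_pending_buffer_py rest (pending_chars - PySem.Str.len first) cap
      else
        -- buf[0] = first[overflow:] is a mutation only; the return value is cap
        cap

-- ===== PORT B =====
-- B's forward scan: does the accumulated length reach the overflow somewhere in buf?
def capCutFound (buf : List String) (acc : Int) (overflow : Int) : Bool :=
  match buf with
  | [] => false
  | s :: rest =>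
    if acc + PySem.Str.len s ≥ overflow then true
    else capCutFound rest (acc + PySem.Str.len s) overflow

-- Port of B: single pass to find the cutoff (the slice deletion / trim are mutations only).
def cap_pending_buffer_py_alt (buf : List String) (pending_chars : Int) (cap : Int) : Int :=
  if pending_chars ≤ cap then pending_chars
  else if capCutFound buf 0 (pending_chars - cap) then cap
  else 0

-- ===== PRECONDITION & SPEC =====
def Spec_cap_pending_buffer_py (buf : List String) (pending_chars : Int) (cap : Int) (out : Int) : Prop := out = cap_pending_buffer_py_alt buf pending_chars cap
instance (buf : List String) (pending_chars : Int) (cap : Int) (out : Int) : Decidable (Spec_cap_pending_buffer_py buf pending_chars cap out) := by unfold Spec_cap_pending_buffer_py; infer_instance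

-- ===== CLAIM (what is proved, stated in full; the proofs are below) =====
def Claim_equal_cap_pending_buffer_py : Prop := ∀ (buf : List String) (pending_chars : Int) (cap : Int), Dom_cap_pending_buffer_py buf pending_chars cap → Spec_cap_pending_buffer_py buf pending_chars cap (cap_pending_buffer_py buf pending_chars cap)

-- ===== LEMMAS AND PROOFS =====

-- shift invariance of the scan accumulator
theorem capCutFound_shift (buf : List String) (acc overflow : Int) :
    capCutFound buf acc overflow = capCutFound buf 0 (overflow - acc) := by
  induction buf generalizing acc overflow with
  | nil => rfl
  | cons s rest ih =>
    simp only [capCutFound]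
    by_cases h : acc + PySem.Str.len s ≥ overflow
    · rw [if_pos h, if_pos (by omega)]
    · rw [if_neg h, if_neg (by omega), ih, ih (0 + PySem.Str.len s)]
      congr 1; omega

-- B's scan satisfies an A-shaped one-step recursion
theorem alt_cons (first : String) (rest : List String) (p c : Int) (hle : ¬ p ≤ c) :
    cap_pending_buffer_py_alt (first :: rest) p c =
      if PySem.Str.len first ≥ p - c then c
      else cap_pending_buffer_py_alt rest (p - PySem.Str.len first) c := by
  unfold cap_pending_buffer_py_alt
  rw [if_neg hle]
  simp only [capCutFound]
  by_cases h2 : (0:Int) + PySem.Str.len first ≥ p - c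
  · simp only [if_pos h2, if_pos (show PySem.Str.len first ≥ p - c by omega)]
    simp
  · simp only [if_neg h2]
    rw [capCutFound_shift rest (0 + PySem.Str.len first),
        (by ring : p - c - (0 + PySem.Str.len first) = p - PySem.Str.len first - c),
        if_neg (by omega : ¬ PySem.Str.len first ≥ p - c),
        if_neg (by omega : ¬ p - PySem.Str.len first ≤ c)]

theorem cap_eq (buf : List String) (pending_chars cap : Int) :
    cap_pending_buffer_py buf pending_chars cap = cap_pending_buffer_py_alt buf pending_chars cap := by
  induction buf generalizing pending_chars with
  | nil =>
    simp [cap_pending_buffer_py, cap_pending_buffer_py_alt, capCutFound]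
  | cons first rest ih =>
    by_cases hle : pending_chars ≤ cap
    · simp [cap_pending_buffer_py, cap_pending_buffer_py_alt, hle]
    · rw [alt_cons first rest pending_chars cap hle]
      simp only [cap_pending_buffer_py, if_neg hle]
      by_cases h1 : PySem.Str.len first ≤ pending_chars - cap
      · rw [if_pos h1, ih]
        by_cases h2 : PySem.Str.len first ≥ pending_chars - cap
        · -- len = overflow exactly: recursion hits pending = cap and returns it
          rw [if_pos h2]
          have hpc : pending_chars - PySem.Str.len first = cap := by omega
          rw [hpc]
          simp [cap_pending_buffer_py_alt]
        · rw [if_neg h2]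
      · rw [if_neg h1, if_pos (by omega)]

-- ===== VERDICT (by name: the statement is the Claim_ definition above) =====
theorem cap_pending_buffer_py_spec : Claim_equal_cap_pending_buffer_py := by
  intro buf pending_chars cap _
  unfold Spec_cap_pending_buffer_py
  exact cap_eq buf pending_chars cap
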